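-- pv_equiv track=rewrite | github.com/jshiang-git/Comp370-Final-Project | newsapi.py | extract_movie_keywords
-- ===== SOURCE A (Python) =====
-- MOVIE_KEYWORDS = ["film", "movie", "horror", "director", "actor", "box office", "trailer"]
--
-- def extract_movie_keywords(articles):
--     extracted_keywords = set()
--     for article in articles:
--         content = (article.get("title", "") + " " + article.get("description", "")).lower()
--         for word in MOVIE_KEYWORDS:
--             if word in content:
--                 extracted_keywords.add(word)
--     return extracted_keywords
-- ===== SOURCE B (Python) =====
-- MOVIE_KEYWORDS = ["film", "movie", "horror", "director", "actor", "box office", "trailer"]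
--
-- def extract_movie_keywords(articles):
--     found = []
--     remaining = list(MOVIE_KEYWORDS)
--     for article in articles:
--         if not remaining:
--             break
--         content = (article.get("title", "") + " " + article.get("description", "")).lower()
--         still = []
--         for w in remaining:
--             if w in content:
--                 found.append(w)
--             else:
--                 still.append(w)
--         remaining = still
--     return set(found)
-- ===== Notes on version B (the rewrite author's own statement) =====
-- stated objective: alternative
-- what changed: B maintains a worklist of not-yet-found keywords and splits it into hits/misses per article, appending hits to a found-list and breaking out of the article loop as soon as the worklist is empty, instead of A's re-testing all seven keywords against every article while accumulating into a growing set.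
import Mathlib
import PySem

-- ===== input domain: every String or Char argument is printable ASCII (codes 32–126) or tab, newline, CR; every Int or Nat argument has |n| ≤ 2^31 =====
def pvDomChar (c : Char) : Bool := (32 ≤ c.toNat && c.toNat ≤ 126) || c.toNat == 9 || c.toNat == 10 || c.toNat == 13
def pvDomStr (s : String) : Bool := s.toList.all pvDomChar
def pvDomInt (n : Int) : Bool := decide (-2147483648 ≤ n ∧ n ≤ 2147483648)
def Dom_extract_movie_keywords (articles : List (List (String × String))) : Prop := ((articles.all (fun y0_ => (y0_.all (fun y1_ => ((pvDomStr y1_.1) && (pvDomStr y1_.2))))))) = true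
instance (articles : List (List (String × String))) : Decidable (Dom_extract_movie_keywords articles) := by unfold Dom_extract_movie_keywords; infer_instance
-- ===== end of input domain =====

-- B keeps a worklist of the keywords not yet found (each keyword is substring-tested at most once
-- per article until found, and the article scan stops once the worklist is empty), instead of A's
-- re-testing all seven keywords against every article while accumulating into a set.

def MOVIE_KEYWORDS : List String :=
  ["film", "movie", "horror", "director", "actor", "box office", "trailer"]

def articleContent (article : List (String × String)) : String :=
  PySem.Str.lower (PySem.Dict.getD (PySem.Dict.mk article) "title" ""
    ++ " " ++ PySem.Dict.getD (PySem.Dict.mk article) "description" "")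

-- ===== PORT A =====
def extract_movie_keywords (articles : List (List (String × String))) : List String :=
  articles.foldl
    (fun extracted article =>
      let content := articleContent article
      MOVIE_KEYWORDS.foldl
        (fun s word => if PySem.Str.isIn word content then PySem.Set.add s word else s)
        extracted)
    PySem.Set.empty

-- ===== PORT B =====
-- the article loop of Source B, with its 'if not remaining: break'; state = (found, remaining)
def bArticleLoop : List (List (String × String)) → List String × List String → List String × List String
  | [], st => st
  | article :: rest, (found, remaining) =>
      if remaining = [] then (found, remaining)
      else
        let content := articleContent article
        let st := remaining.foldl
          (fun (p : List String × List String) w =>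
            if PySem.Str.isIn w content then (p.1 ++ [w], p.2) else (p.1, p.2 ++ [w]))
          (found, [])
        bArticleLoop rest st

def extract_movie_keywords_alt (articles : List (List (String × String))) : List String :=
  PySem.Set.ofList (bArticleLoop articles ([], MOVIE_KEYWORDS)).1

-- ===== PRECONDITION & SPEC =====
def Spec_extract_movie_keywords (articles : List (List (String × String))) (out : List String) : Prop := out = extract_movie_keywords_alt articles
instance (articles : List (List (String × String))) (out : List String) : Decidable (Spec_extract_movie_keywords articles out) := by unfold Spec_extract_movie_keywords; infer_instance

-- ===== CLAIM (what is proved, stated in full; the proofs are below) =====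
def Claim_equal_extract_movie_keywords : Prop := ∀ (articles : List (List (String × String))), Dom_extract_movie_keywords articles → Spec_extract_movie_keywords articles (extract_movie_keywords articles)

-- ===== LEMMAS AND PROOFS =====

-- A's inner keyword fold (hit = 'word in content'), on a duplicate-free keyword list,
-- appends exactly the hits not yet present, in order.
theorem innerA_eq (hit : String → Bool) :
    ∀ (kws s : List String), kws.Nodup →
      kws.foldl (fun s word => if hit word then PySem.Set.add s word else s) s
        = s ++ kws.filter (fun w => hit w && decide (w ∉ s)) := by
  intro kws
  induction kws with
  | nil => intro s _; simp
  | cons w rest ih =>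
    intro s hnd
    have hndr : rest.Nodup := hnd.of_cons
    have hwr : w ∉ rest := by simp [List.nodup_cons] at hnd; exact hnd.1
    simp only [List.foldl_cons, List.filter_cons]
    by_cases hin : hit w = true
    · by_cases hmem : w ∈ s
      · have hid : PySem.Set.add s w = s := by
          simp [PySem.Set.add, PySem.Set.contains, hmem]
        rw [if_pos hin, hid, ih s hndr]
        simp [hin, hmem]
      · have hadd : PySem.Set.add s w = s ++ [w] := by
          simp [PySem.Set.add, PySem.Set.contains, hmem]
        have hfc : rest.filter (fun v => hit v && decide (v ∉ s ++ [w]))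
            = rest.filter (fun v => hit v && decide (v ∉ s)) := by
          apply List.filter_congr
          intro v hv
          have hvw : v ≠ w := fun h => hwr (h ▸ hv)
          simp [List.mem_append, hvw]
        rw [if_pos hin, hadd, ih _ hndr, hfc]
        simp [hin, hmem]
    · rw [if_neg hin, ih s hndr]
      simp [hin]

-- B's inner split fold: hits are appended to found, misses to the fresh still-list, in order.
theorem innerB_eq (hit : String → Bool) :
    ∀ (rem found acc : List String),
      rem.foldl
        (fun (p : List String × List String) w =>
          if hit w then (p.1 ++ [w], p.2) else (p.1, p.2 ++ [w]))
        (found, acc)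
      = (found ++ rem.filter (fun w => hit w),
         acc ++ rem.filter (fun w => !hit w)) := by
  intro rem
  induction rem with
  | nil => intro found acc; simp
  | cons w rest ih =>
    intro found acc
    by_cases hin : hit w = true
    · simp only [List.foldl_cons, List.filter_cons, hin, if_pos, Bool.not_true, ih]
      simp
    · simp only [List.foldl_cons, List.filter_cons, hin, if_neg, Bool.not_eq_true] at *
      simp [ih]

-- once every keyword is already extracted, A's remaining article fold is the identity
theorem outerA_stable (hitOf : List (String × String) → String → Bool) (s : List String)
    (h : MOVIE_KEYWORDS.filter (fun w => decide (w ∉ s)) = []) :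
    ∀ (arts : List (List (String × String))),
      arts.foldl
        (fun extracted article =>
          MOVIE_KEYWORDS.foldl
            (fun t word => if hitOf article word then PySem.Set.add t word else t)
            extracted)
        s = s := by
  have hall : ∀ w ∈ MOVIE_KEYWORDS, w ∈ s := by
    intro w hw
    have := List.filter_eq_nil_iff.mp h w hw
    simpa using this
  intro arts
  induction arts with
  | nil => rfl
  | cons a rest ih =>
    have hstep :
        MOVIE_KEYWORDS.foldl
          (fun t word => if hitOf a word then PySem.Set.add t word else t)
          s = s := by
      rw [innerA_eq _ _ _ (by decide)]
      have hz : MOVIE_KEYWORDS.filter (fun w => hitOf a w && decide (w ∉ s)) = [] := by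
        apply List.filter_eq_nil_iff.mpr
        intro w hw
        simp [hall w hw]
      rw [hz, List.append_nil]
    rw [List.foldl_cons, hstep, ih]

-- main invariant: A's article fold from s = found equals B's worklist loop from
-- (found, keywords not yet found), and the found-list stays duplicate-free.
theorem main_inv :
    ∀ (arts : List (List (String × String))) (found : List String), found.Nodup →
      arts.foldl
        (fun extracted article =>
          MOVIE_KEYWORDS.foldl
            (fun t word => if PySem.Str.isIn word (articleContent article) then PySem.Set.add t word else t)
            extracted)
        found
      = (bArticleLoop arts (found, MOVIE_KEYWORDS.filter (fun w => decide (w ∉ found)))).1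
      ∧ (bArticleLoop arts (found, MOVIE_KEYWORDS.filter (fun w => decide (w ∉ found)))).1.Nodup := by
  intro arts
  induction arts with
  | nil => intro found hnd; exact ⟨rfl, hnd⟩
  | cons a rest ih =>
    intro found hnd
    by_cases hrem : MOVIE_KEYWORDS.filter (fun w => decide (w ∉ found)) = []
    · rw [bArticleLoop]
      simp only [hrem, if_pos]
      refine ⟨?_, hnd⟩
      exact outerA_stable (fun article word => PySem.Str.isIn word (articleContent article))
        found hrem (a :: rest)
    · rw [bArticleLoop]
      simp only [hrem, if_neg, not_false_iff]
      rw [innerB_eq (fun w => PySem.Str.isIn w (articleContent a))]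
      set hit : String → Bool := fun w => PySem.Str.isIn w (articleContent a) with hhit
      set found' := found ++ (MOVIE_KEYWORDS.filter (fun w => decide (w ∉ found))).filter
          (fun w => hit w) with hf'
      have hmemf' : ∀ w ∈ MOVIE_KEYWORDS,
          (w ∈ found' ↔ w ∈ found ∨ hit w = true) := by
        intro w hw
        constructor
        · intro h
          rcases List.mem_append.mp h with h | h
          · exact Or.inl h
          · exact Or.inr (List.of_mem_filter h)
        · intro h
          rcases h with h | h
          · exact List.mem_append.mpr (Or.inl h)
          · by_cases h2 : w ∈ found
            · exact List.mem_append.mpr (Or.inl h2)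
            · refine List.mem_append.mpr (Or.inr ?_)
              refine List.mem_filter.mpr ⟨List.mem_filter.mpr ⟨hw, by simp [h2]⟩, h⟩
      have hAstep :
          MOVIE_KEYWORDS.foldl (fun t word => if hit word then PySem.Set.add t word else t) found
            = found' := by
        rw [innerA_eq hit _ _ (by decide), hf', List.filter_filter]
      have hnd' : found'.Nodup := by
        rw [hf']
        refine List.Nodup.append hnd (List.Nodup.filter _ (List.Nodup.filter _ (by decide))) ?_
        intro w hw1 hw2
        have := List.of_mem_filter (α := String) (List.mem_of_mem_filter hw2)
        simp at this
        exact this hw1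
      have hrem' :
          ([] : List String) ++ (MOVIE_KEYWORDS.filter (fun w => decide (w ∉ found))).filter
              (fun w => !hit w)
            = MOVIE_KEYWORDS.filter (fun w => decide (w ∉ found')) := by
        rw [List.nil_append, List.filter_filter]
        apply List.filter_congr
        intro w hw
        by_cases h1 : hit w = true <;> by_cases h2 : w ∈ found <;>
          simp [h1, h2, hmemf' w hw]
      rw [List.foldl_cons, hAstep, hrem']
      exact ih found' hnd'

-- ===== VERDICT (by name: the statement is the Claim_ definition above) =====
theorem extract_movie_keywords_spec : Claim_equal_extract_movie_keywords := by
  intro articles _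
  unfold Spec_extract_movie_keywords extract_movie_keywords extract_movie_keywords_alt
  have h := main_inv articles [] (by simp)
  have hfilter : MOVIE_KEYWORDS.filter (fun w => decide (w ∉ ([] : List String))) = MOVIE_KEYWORDS := by decide
  rw [hfilter] at h
  rw [PySem.Set.ofList_eq_self_of_nodup _ h.2]
  exact h.1
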